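-- pv_equiv track=rewrite | github.com/jpeckenpaugh/jpeckenpaugh.github.io | battle_scene_v5b.py | _mushy_art_bounds
-- ===== SOURCE A (Python) =====
-- def _mushy_art_bounds(art_rows: object) -> tuple[int, int, int]:
--     if not isinstance(art_rows, list) or not art_rows:
--         return (0, 0, 0)
--     width = max((len(str(line)) for line in art_rows), default=0)
--     top = len(art_rows)
--     bottom = -1
--     for y, raw in enumerate(art_rows):
--         line = str(raw).ljust(width)
--         if any(ch != " " for ch in line):
--             top = min(top, y)
--             bottom = max(bottom, y)
--     if bottom < 0:
--         return (width, 0, 0)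
--     return (width, top, bottom)
-- ===== SOURCE B (Python) =====
-- def _mushy_art_bounds(art_rows: object) -> tuple[int, int, int]:
--     if not isinstance(art_rows, list) or not art_rows:
--         return (0, 0, 0)
--     width = 0
--     for line in art_rows:
--         width = max(width, len(str(line)))
--     top = None
--     for i in range(len(art_rows)):
--         if any(ch != " " for ch in str(art_rows[i])):
--             top = i
--             break
--     if top is None:
--         return (width, 0, 0)
--     bottom = 0
--     for i in range(len(art_rows) - 1, -1, -1):
--         if any(ch != " " for ch in str(art_rows[i])):
--             bottom = i
--             break
--     return (width, top, bottom)
-- ===== Notes on version B (the rewrite author's own statement) =====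
-- stated objective: faster
-- what changed: Replaces A's single full pass that maintains min/max accumulators over ljust-padded copies of every row by two directed early-exit scans (front-to-back for the top row, back-to-front for the bottom row) on the raw rows, dropping the ljust since added spaces cannot make a row non-blank.
import Mathlib
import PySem

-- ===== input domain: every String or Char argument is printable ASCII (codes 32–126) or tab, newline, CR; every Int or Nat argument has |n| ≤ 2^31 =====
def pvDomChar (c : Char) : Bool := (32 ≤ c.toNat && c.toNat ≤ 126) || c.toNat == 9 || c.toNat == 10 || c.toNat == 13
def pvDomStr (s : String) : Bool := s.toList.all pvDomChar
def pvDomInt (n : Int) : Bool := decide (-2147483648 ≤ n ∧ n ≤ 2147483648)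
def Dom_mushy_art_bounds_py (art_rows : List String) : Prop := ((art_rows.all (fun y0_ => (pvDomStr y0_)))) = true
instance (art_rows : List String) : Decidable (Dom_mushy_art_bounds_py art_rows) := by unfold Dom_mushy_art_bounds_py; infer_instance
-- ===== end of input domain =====

-- B replaces A's single min/max-accumulator pass over ljust-padded rows by two directed
-- early-exit scans on the raw rows (alternative decomposition; return values proved equal).

-- ===== PORT A =====
def mushy_art_bounds_py (art_rows : List String) : Int × Int × Int :=
  if art_rows = [] then (0, 0, 0) else
  let width : Int := (art_rows.map (fun line => (line.toList.length : Int))).foldl max 0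
  let st := (PySem.List.enumerate art_rows 0).foldl
    (fun (st : Int × Int) (p : Int × String) =>
      let line := p.2.toList ++ List.replicate (width.toNat - p.2.toList.length) ' '
      if line.any (fun ch => ch ≠ ' ') then (min st.1 p.1, max st.2 p.1) else st)
    ((art_rows.length : Int), -1)
  if st.2 < 0 then (width, 0, 0) else (width, st.1, st.2)

-- ===== PORT B =====
def pvNonblank (s : String) : Bool := s.toList.any (fun ch => ch ≠ ' ')

def mushy_art_bounds_py_alt (art_rows : List String) : Int × Int × Int :=
  if art_rows = [] then (0, 0, 0) else
  let width : Int := art_rows.foldl (fun w s => max w (s.toList.length : Int)) 0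
  match art_rows.findIdx? pvNonblank with
  | none => (width, 0, 0)
  | some t =>
      let bottom : Nat := art_rows.length - 1 - ((art_rows.reverse.findIdx? pvNonblank).getD 0)
      (width, (t : Int), (bottom : Int))

-- ===== PRECONDITION & SPEC =====
def Spec_mushy_art_bounds_py (art_rows : List String) (out : Int × Int × Int) : Prop := out = mushy_art_bounds_py_alt art_rows
instance (art_rows : List String) (out : Int × Int × Int) : Decidable (Spec_mushy_art_bounds_py art_rows out) := by unfold Spec_mushy_art_bounds_py; infer_instance

-- ===== CLAIM (what is proved, stated in full; the proofs are below) =====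
def Claim_equal_mushy_art_bounds_py : Prop := ∀ (art_rows : List String), Dom_mushy_art_bounds_py art_rows → Spec_mushy_art_bounds_py art_rows (mushy_art_bounds_py art_rows)

-- ===== LEMMAS AND PROOFS =====

-- padding with spaces does not change the non-blank test
theorem pad_any (s : String) (m : Nat) :
    (s.toList ++ List.replicate m ' ').any (fun ch => ch ≠ ' ') = pvNonblank s := by
  simp [pvNonblank, List.any_append]

-- first component of A's fold = first hit
theorem fold_fst (l : List String) (k t b : Int) (f : String → Bool) :
    ((PySem.List.enumerate l k).foldl
      (fun (st : Int × Int) (p : Int × String) =>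
        if f p.2 then (min st.1 p.1, max st.2 p.1) else st) (t, b)).1 =
    (l.findIdx? f).elim t (fun j => min t (k + j)) := by
  induction l generalizing k t b with
  | nil => simp [PySem.List.enumerate]
  | cons x xs ih =>
    rw [PySem.List.enumerate_cons]
    simp only [List.foldl_cons, List.findIdx?_cons]
    by_cases hx : f x
    · simp only [hx, if_pos]
      rw [ih]
      cases hfi : xs.findIdx? f with
      | none => simp
      | some j =>
        have hk : (k : Int) ≤ k + 1 + (j : Int) := by linarith [Int.natCast_nonneg j]
        simp only [Option.elim_some]
        rw [min_assoc, min_eq_left hk]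
        norm_num
    · simp only [hx, Bool.false_eq_true, if_false]
      rw [ih]
      cases hfi : xs.findIdx? f with
      | none => simp
      | some j =>
        simp only [Option.map_some, Option.elim_some]
        congr 1
        push_cast
        ring

-- last hit, structurally
def lastHit (f : String → Bool) : List String → Option Nat
  | [] => none
  | x :: xs =>
      match lastHit f xs with
      | some j => some (j + 1)
      | none => if f x then some 0 else none

-- second component of A's fold = last hit
theorem fold_snd (l : List String) (k t b : Int) (f : String → Bool) :
    ((PySem.List.enumerate l k).foldl
      (fun (st : Int × Int) (p : Int × String) =>
        if f p.2 then (min st.1 p.1, max st.2 p.1) else st) (t, b)).2 =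
    (lastHit f l).elim b (fun j => max b (k + j)) := by
  induction l generalizing k t b with
  | nil => simp [PySem.List.enumerate, lastHit]
  | cons x xs ih =>
    rw [PySem.List.enumerate_cons]
    simp only [List.foldl_cons, lastHit]
    by_cases hx : f x
    · simp only [hx, if_pos]
      rw [ih]
      cases hfi : lastHit f xs with
      | none => simp
      | some j =>
        have hk : (k : Int) ≤ k + 1 + (j : Int) := by linarith [Int.natCast_nonneg j]
        simp only [Option.elim_some]
        rw [max_assoc, max_eq_right hk]
        congr 1
        push_cast
        ring
    · simp only [hx, Bool.false_eq_true, if_false]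
      rw [ih]
      cases hfi : lastHit f xs with
      | none => simp
      | some j =>
        simp only [Option.elim_some]
        congr 1
        push_cast
        ring

-- lastHit via findIdx? on the reverse
theorem lastHit_eq_reverse (f : String → Bool) (l : List String) :
    lastHit f l = (l.reverse.findIdx? f).map (fun j => l.length - 1 - j) := by
  induction l with
  | nil => simp [lastHit]
  | cons x xs ih =>
    simp only [lastHit, List.reverse_cons, List.findIdx?_append]
    cases hrev : xs.reverse.findIdx? f with
    | none =>
      rw [ih, hrev]
      by_cases hx : f x <;>
        simp [hx, List.findIdx?_cons, List.length_reverse]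
    | some j =>
      have hj : j < xs.length := by
        have h1 := List.findIdx?_eq_some_iff_findIdx_eq.1 hrev
        have h2 := h1.1
        simpa using h2
      rw [ih, hrev]
      simp only [Option.map_some, Option.some_or, List.length_cons]
      congr 1
      omega

theorem findIdx?_lt {f : String → Bool} {l : List String} {j : Nat}
    (h : l.findIdx? f = some j) : j < l.length := by
  have h1 := List.findIdx?_eq_some_iff_findIdx_eq.1 h
  have h2 := h1.1
  simpa using h2

-- a first hit exists iff a last hit exists
theorem lastHit_none_iff (f : String → Bool) (l : List String) :
    lastHit f l = none ↔ l.findIdx? f = none := by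
  rw [lastHit_eq_reverse]
  simp [List.findIdx?_eq_none_iff, List.mem_reverse]

-- A's width and B's width are the same fold
theorem width_eq (l : List String) :
    (l.map (fun line => (line.toList.length : Int))).foldl max 0 =
    l.foldl (fun w s => max w (s.toList.length : Int)) 0 := by
  rw [List.foldl_map]

-- ===== VERDICT (by name: the statement is the Claim_ definition above) =====
theorem mushy_art_bounds_py_spec : Claim_equal_mushy_art_bounds_py := by
  intro art_rows _
  unfold Spec_mushy_art_bounds_py mushy_art_bounds_py mushy_art_bounds_py_alt
  by_cases hnil : art_rows = []
  · simp [hnil]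
  · simp only [hnil, if_neg, not_false_iff]
    rw [width_eq]
    set w := art_rows.foldl (fun w s => max w (s.toList.length : Int)) 0 with hw
    have hfold :
        (PySem.List.enumerate art_rows 0).foldl
          (fun (st : Int × Int) (p : Int × String) =>
            let line := p.2.toList ++ List.replicate (w.toNat - p.2.toList.length) ' '
            if line.any (fun ch => ch ≠ ' ') then (min st.1 p.1, max st.2 p.1) else st)
          ((art_rows.length : Int), -1) =
        (PySem.List.enumerate art_rows 0).foldl
          (fun (st : Int × Int) (p : Int × String) =>
            if pvNonblank p.2 then (min st.1 p.1, max st.2 p.1) else st)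
          ((art_rows.length : Int), -1) := by
      apply PySem.List.foldl_congr_mem
      intro st p _
      simp only [pad_any]
    rw [hfold]
    set F := (PySem.List.enumerate art_rows 0).foldl
      (fun (st : Int × Int) (p : Int × String) =>
        if pvNonblank p.2 then (min st.1 p.1, max st.2 p.1) else st)
      ((art_rows.length : Int), -1) with hF
    have h1 := fold_fst art_rows 0 (art_rows.length : Int) (-1) pvNonblank
    have h2 := fold_snd art_rows 0 (art_rows.length : Int) (-1) pvNonblank
    rw [← hF] at h1 h2
    cases hfi : art_rows.findIdx? pvNonblank with
    | none =>
      have hlast : lastHit pvNonblank art_rows = none := (lastHit_none_iff _ _).2 hfi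
      rw [hlast] at h2
      simp only [Option.elim_none] at h2
      simp only [h2]
      norm_num
    | some t =>
      obtain ⟨j, hlf⟩ : ∃ j, lastHit pvNonblank art_rows = some j := by
        cases h : lastHit pvNonblank art_rows with
        | none => rw [(lastHit_none_iff _ _).1 h] at hfi; cases hfi
        | some j => exact ⟨j, rfl⟩
      rw [hfi] at h1; rw [hlf] at h2
      simp only [Option.elim_some] at h1 h2
      have ht : t < art_rows.length := findIdx?_lt hfi
      have h1' : F.1 = (t : Int) := by
        rw [h1, zero_add]
        exact min_eq_right (by exact_mod_cast ht.le)
      have h2' : F.2 = (j : Int) := by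
        rw [h2, zero_add]
        exact max_eq_right (by linarith [Int.natCast_nonneg j])
      have hlhr := lastHit_eq_reverse pvNonblank art_rows
      rw [hlf] at hlhr
      cases hrev : art_rows.reverse.findIdx? pvNonblank with
      | none => rw [hrev] at hlhr; simp at hlhr
      | some r =>
        rw [hrev] at hlhr
        simp only [Option.map_some] at hlhr
        have hr : j = art_rows.length - 1 - r := Option.some.inj hlhr
        simp only [Option.getD_some, h1', h2', hr]
        rw [if_neg (not_lt.2 (Int.natCast_nonneg _))]
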